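-- pv_equiv track=rewrite | github.com/armadillica/flamenco | flamenco/utils.py | frame_range_start_end
-- ===== SOURCE A (Python) =====
-- import typing
--
-- def frame_range_start_end(frame_range: typing.Optional[str]) \
--         -> typing.Tuple[typing.Optional[int], typing.Optional[int]]:
--     """Given a range of frames, return the start and end frame.
--
--     :Example:
--     >>> frame_range_start_end('0-100')
--     (0, 100)
--     >>> frame_range_start_end('1,3-5,8')
--     (1, 8)
--     """
--     if not frame_range:
--         return None, None
--
--     min_start = float('inf')
--     max_end = float('-inf')
--     for part in frame_range.split(','):
--         x = part.split("-")
--         num_parts = len(x)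
--         if num_parts == 1:
--             frame = int(x[0])
--             part_start = part_end = frame
--         elif num_parts == 2:
--             part_start = int(x[0])
--             part_end = int(x[1])
--         else:
--             continue
--         min_start = min(min_start, part_start)
--         max_end = max(max_end, part_end)
--
--     return min_start, max_end
-- ===== SOURCE B (Python) =====
-- import typing
--
--
-- def _parse_part(part):
--     x = part.split("-")
--     if len(x) == 1:
--         n = int(x[0])
--         return [(n, n)]
--     if len(x) == 2:
--         return [(int(x[0]), int(x[1]))]
--     return []
--
--
-- def frame_range_start_end(frame_range: typing.Optional[str]) \
--         -> typing.Tuple[typing.Optional[int], typing.Optional[int]]: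
--     if not frame_range:
--         return None, None
--     pairs = [p for part in frame_range.split(',') for p in _parse_part(part)]
--     return min(s for s, _ in pairs), max(e for _, e in pairs)
-- ===== Notes on version B (the rewrite author's own statement) =====
-- stated objective: idiomatic
-- what changed: B parses each comma part into (start,end) pairs with a helper and reduces the collected pairs once with min/max, instead of threading float-infinity min/max accumulators through the loop.
-- outside the precondition, e.g. on frame_range_start_end('1-2-3'): A returns (inf, -inf), B raises ValueError
import Mathlib
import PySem

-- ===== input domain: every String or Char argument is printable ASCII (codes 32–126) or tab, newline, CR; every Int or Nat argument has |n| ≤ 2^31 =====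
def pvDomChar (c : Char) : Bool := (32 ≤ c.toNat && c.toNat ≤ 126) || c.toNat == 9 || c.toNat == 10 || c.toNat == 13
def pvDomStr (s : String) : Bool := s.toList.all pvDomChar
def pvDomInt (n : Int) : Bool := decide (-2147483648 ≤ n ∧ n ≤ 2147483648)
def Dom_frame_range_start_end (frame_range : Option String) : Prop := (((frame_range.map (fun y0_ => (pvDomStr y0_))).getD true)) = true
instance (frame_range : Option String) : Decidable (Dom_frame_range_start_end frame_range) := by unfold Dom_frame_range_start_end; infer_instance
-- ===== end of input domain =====

-- B parses each comma part into (start, end) pairs with a helper and reduces once with min/max,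
-- instead of A's float-infinity min/max accumulators threaded through the loop (objective: idiomatic).

-- ===== PORT A =====
-- A's min_start = float('inf') / max_end = float('-inf') accumulators are Option Int here:
-- none = still at the infinity sentinel (min(inf, v) = v, max(-inf, v) = v).
def pvUpdMin (mn : Option Int) (v : Int) : Option Int :=
  some (match mn with | none => v | some m => min m v)

def pvUpdMax (mx : Option Int) (v : Int) : Option Int :=
  some (match mx with | none => v | some m => max m v)

-- the for-loop of A; where Python's int() raises ValueError (outside Pre_) it returns (none, none)
def pvLoopA : List (List Char) → Option Int → Option Int → Option Int × Option Int
  | [], mn, mx => (mn, mx)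
  | part :: rest, mn, mx =>
    match PySem.Chars.splitOn part ['-'] with
    | [a] =>
      match PySem.Int.ofChars? a with
      | some n => pvLoopA rest (pvUpdMin mn n) (pvUpdMax mx n)
      | none => (none, none)
    | [a, b] =>
      match PySem.Int.ofChars? a, PySem.Int.ofChars? b with
      | some x, some y => pvLoopA rest (pvUpdMin mn x) (pvUpdMax mx y)
      | _, _ => (none, none)
    | _ => pvLoopA rest mn mx

def frame_range_start_end (frame_range : Option String) : Option Int × Option Int :=
  match frame_range with
  | none => (none, none)
  | some s =>
    if s = "" then (none, none)
    else pvLoopA (PySem.Chars.splitOn s.toList [',']) none none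

-- ===== PORT B =====
-- _parse_part of Source B; where Python's int() raises ValueError (outside Pre_) it returns []
def pvParsePart (part : List Char) : List (Int × Int) :=
  match PySem.Chars.splitOn part ['-'] with
  | [a] =>
    match PySem.Int.ofChars? a with
    | some n => [(n, n)]
    | none => []
  | [a, b] =>
    match PySem.Int.ofChars? a, PySem.Int.ofChars? b with
    | some x, some y => [(x, y)]
    | _, _ => []
  | _ => []

def frame_range_start_end_alt (frame_range : Option String) : Option Int × Option Int :=
  match frame_range with
  | none => (none, none)
  | some s =>
    if s = "" then (none, none)
    else
      let pairs := (PySem.Chars.splitOn s.toList [',']).flatMap pvParsePart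
      (PySem.List.min? (pairs.map (·.1)) (fun x => x),
       PySem.List.max? (pairs.map (·.2)) (fun x => x))

-- ===== PRECONDITION & SPEC =====
def pvOkPart (part : List Char) : Bool :=
  match PySem.Chars.splitOn part ['-'] with
  | [a] => (PySem.Int.ofChars? a).isSome
  | [a, b] => (PySem.Int.ofChars? a).isSome && (PySem.Int.ofChars? b).isSome
  | _ => true

def pvShortPart (part : List Char) : Bool := (PySem.Chars.splitOn part ['-']).length ≤ 2

def pvPreB (s : String) : Bool :=
  (s == "") ||
    ((PySem.Chars.splitOn s.toList [',']).all pvOkPart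
      && (PySem.Chars.splitOn s.toList [',']).any pvShortPart)

-- Pre_ excludes strings on which Python's int() raises ValueError on some kept part, and strings
-- whose every comma part splits into >2 dash pieces, where A returns (inf, -inf) — floats outside
-- the declared Optional[int] type — while B raises ValueError.
def Pre_frame_range_start_end (frame_range : Option String) : Prop :=
  (frame_range.map pvPreB).getD true = true
instance (frame_range : Option String) : Decidable (Pre_frame_range_start_end frame_range) := by
  unfold Pre_frame_range_start_end; infer_instance

def pvWitness_frame_range_start_end : Option String := some "1,3-5,8"

def Spec_frame_range_start_end (frame_range : Option String) (out : Option Int × Option Int) : Prop := out = frame_range_start_end_alt frame_range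
instance (frame_range : Option String) (out : Option Int × Option Int) : Decidable (Spec_frame_range_start_end frame_range out) := by unfold Spec_frame_range_start_end; infer_instance

-- ===== CLAIM (what is proved, stated in full; the proofs are below) =====
def Claim_equal_frame_range_start_end : Prop := ∀ (frame_range : Option String), Dom_frame_range_start_end frame_range → Pre_frame_range_start_end frame_range → Spec_frame_range_start_end frame_range (frame_range_start_end frame_range)

-- ===== LEMMAS AND PROOFS =====

theorem pvFoldMin_some (l : List (Int × Int)) : ∀ (m : Int),
    l.foldl (fun acc p => pvUpdMin acc p.1) (some m) = some ((l.map (·.1)).foldl min m) := by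
  induction l with
  | nil => intro m; rfl
  | cons p t ih => intro m; simpa [pvUpdMin] using ih (min m p.1)

theorem pvFoldMax_some (l : List (Int × Int)) : ∀ (m : Int),
    l.foldl (fun acc p => pvUpdMax acc p.2) (some m) = some ((l.map (·.2)).foldl max m) := by
  induction l with
  | nil => intro m; rfl
  | cons p t ih => intro m; simpa [pvUpdMax] using ih (max m p.2)

theorem pvFoldMin_none (l : List (Int × Int)) :
    l.foldl (fun acc p => pvUpdMin acc p.1) none
      = PySem.List.min? (l.map (·.1)) (fun x => x) := by
  cases l with
  | nil => rfl
  | cons p t =>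
    show t.foldl (fun acc p => pvUpdMin acc p.1) (pvUpdMin none p.1) = _
    rw [show pvUpdMin none p.1 = some p.1 from rfl, pvFoldMin_some,
      List.map_cons, PySem.List.min?_id_cons]

theorem pvFoldMax_none (l : List (Int × Int)) :
    l.foldl (fun acc p => pvUpdMax acc p.2) none
      = PySem.List.max? (l.map (·.2)) (fun x => x) := by
  cases l with
  | nil => rfl
  | cons p t =>
    show t.foldl (fun acc p => pvUpdMax acc p.2) (pvUpdMax none p.2) = _
    rw [show pvUpdMax none p.2 = some p.2 from rfl, pvFoldMax_some,
      List.map_cons, PySem.List.max?_id_cons]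

-- the loop of A computes exactly the two folds over B's collected pairs
theorem pvLoopA_eq_folds (parts : List (List Char)) : ∀ (mn mx : Option Int),
    parts.all pvOkPart = true →
    pvLoopA parts mn mx =
      ((parts.flatMap pvParsePart).foldl (fun acc p => pvUpdMin acc p.1) mn,
       (parts.flatMap pvParsePart).foldl (fun acc p => pvUpdMax acc p.2) mx) := by
  induction parts with
  | nil => intro mn mx _; rfl
  | cons part rest ih =>
    intro mn mx hall
    rw [List.all_cons, Bool.and_eq_true] at hall
    obtain ⟨hok, hrest⟩ := hall
    rw [List.flatMap_cons, List.foldl_append, List.foldl_append]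
    unfold pvOkPart at hok
    cases hsp : PySem.Chars.splitOn part ['-'] with
    | nil =>
      simp only [pvLoopA, pvParsePart, hsp, List.foldl_nil]
      exact ih mn mx hrest
    | cons a ta =>
      rw [hsp] at hok
      cases ta with
      | nil =>
        have hok' : (PySem.Int.ofChars? a).isSome = true := hok
        cases hn : PySem.Int.ofChars? a with
        | none => rw [hn] at hok'; simp at hok'
        | some n =>
          simp only [pvLoopA, pvParsePart, hsp, hn, List.foldl_cons, List.foldl_nil]
          exact ih _ _ hrest
      | cons b tb =>
        cases tb with
        | nil =>
          have hok' : ((PySem.Int.ofChars? a).isSome && (PySem.Int.ofChars? b).isSome) = true := hok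
          rw [Bool.and_eq_true] at hok'
          cases hx : PySem.Int.ofChars? a with
          | none => rw [hx] at hok'; simp at hok'
          | some x =>
            cases hy : PySem.Int.ofChars? b with
            | none => rw [hy] at hok'; simp at hok'
            | some y =>
              simp only [pvLoopA, pvParsePart, hsp, hx, hy, List.foldl_cons, List.foldl_nil]
              exact ih _ _ hrest
        | cons c tc =>
          simp only [pvLoopA, pvParsePart, hsp, List.foldl_nil]
          exact ih mn mx hrest

-- ===== VERDICT (by name: the statement is the Claim_ definition above) =====
theorem frame_range_start_end_spec : Claim_equal_frame_range_start_end := by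
  intro fr _ hpre
  unfold Spec_frame_range_start_end
  cases fr with
  | none => rfl
  | some s =>
    unfold frame_range_start_end frame_range_start_end_alt
    by_cases hs : s = ""
    · simp only [if_pos hs]
    · simp only [if_neg hs]
      unfold Pre_frame_range_start_end pvPreB at hpre
      simp only [Option.map_some, Option.getD_some, Bool.or_eq_true, beq_iff_eq,
        Bool.and_eq_true] at hpre
      rcases hpre with h | ⟨hall, _⟩
      · exact absurd h hs
      · rw [pvLoopA_eq_folds _ _ _ hall, pvFoldMin_none, pvFoldMax_none]
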